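-- pv_equiv track=rewrite | github.com/B4nJuice/42-piscine-python | 03/ex5/ft_data_stream.py | game_event_generator
-- ===== SOURCE A (Python) =====
-- def game_event_generator(n: int) -> tuple[int, str, int, str]:
--     '''
--     Generate n game events.
--     '''
--     players = ["Bob", "Alice", "Charlie"]
--     levels = [1, 5, 8, 12]
--     actions = ["killed monster", "found treasure", "leveled up", "died"]
--
--     n_player = len(players)
--     n_level = len(levels)
--     n_action = len(actions)
--
--     for i in range(n):
--         yield (
--             i,
--             players[i % n_player],
--             levels[i % n_level],
--             actions[i % n_action],
--         )
-- ===== SOURCE B (Python) =====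
-- def game_event_generator(n: int):
--     players = ["Bob", "Alice", "Charlie"]
--     levels = [1, 5, 8, 12]
--     actions = ["killed monster", "found treasure", "leveled up", "died"]
--
--     ps, ls, acts = players, levels, actions
--     i = 0
--     while i < n:
--         yield (i, ps[0], ls[0], acts[0])
--         ps = ps[1:] or players
--         ls = ls[1:] or levels
--         acts = acts[1:] or actions
--         i += 1
-- ===== Notes on version B (the rewrite author's own statement) =====
-- stated objective: alternative
-- what changed: Replaces per-step modulo indexing into the three fixed lists by three rotating list suffixes (a hand-rolled cycle): each iteration reads the current head and advances the suffix, resetting to the full list when exhausted, with no modulo arithmetic at all.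
import Mathlib
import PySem

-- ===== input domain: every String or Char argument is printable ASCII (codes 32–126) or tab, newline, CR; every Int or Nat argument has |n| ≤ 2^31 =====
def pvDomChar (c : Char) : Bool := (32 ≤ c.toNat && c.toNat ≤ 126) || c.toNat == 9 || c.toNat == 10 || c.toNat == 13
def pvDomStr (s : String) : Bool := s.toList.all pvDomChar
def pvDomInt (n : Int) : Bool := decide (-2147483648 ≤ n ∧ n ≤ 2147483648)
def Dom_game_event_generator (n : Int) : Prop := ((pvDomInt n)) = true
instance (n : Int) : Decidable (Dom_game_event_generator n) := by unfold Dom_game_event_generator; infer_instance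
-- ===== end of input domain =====

-- B replaces A's per-step modulo indexing by three rotating list suffixes (a hand-rolled
-- cycle); same n tuples in the same order, no modulo arithmetic. Generators are compared
-- as the list of yielded tuples.

-- the three module-level literal lists, shared verbatim by both Pythons
def pvPlayers : List String := ["Bob", "Alice", "Charlie"]
def pvLevels : List Int := [1, 5, 8, 12]
def pvActions : List String := ["killed monster", "found treasure", "leveled up", "died"]

-- ===== PORT A =====
-- for i in range(n): yield (i, players[i % 3], levels[i % 4], actions[i % 4])
-- i % len is always in range for the literal non-empty lists, so pyGetD's default is never read
def game_event_generator (n : Int) : List (Int × String × Int × String) :=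
  (PySem.List.pyRange 0 n 1).map (fun i =>
    (i,
     PySem.List.pyGetD pvPlayers (PySem.Int.mod i 3) "",
     PySem.List.pyGetD pvLevels (PySem.Int.mod i 4) 0,
     PySem.List.pyGetD pvActions (PySem.Int.mod i 4) ""))

-- ===== PORT B =====
-- while i < n: yield heads of the three rotating suffixes, then advance each suffix,
-- resetting to the full list when the slice xs[1:] is empty ('xs[1:] or full').
-- The suffixes are non-empty throughout, so xs[0] = headD and xs[1:] = tail are exact.
def pvAltLoop : Nat → Int → List String → List Int → List String → List (Int × String × Int × String)
  | 0, _, _, _, _ => []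
  | k + 1, i, ps, ls, acts =>
    (i, ps.headD "", ls.headD 0, acts.headD "") ::
    pvAltLoop k (i + 1)
      (if ps.tail.isEmpty then pvPlayers else ps.tail)
      (if ls.tail.isEmpty then pvLevels else ls.tail)
      (if acts.tail.isEmpty then pvActions else acts.tail)

def game_event_generator_alt (n : Int) : List (Int × String × Int × String) :=
  pvAltLoop n.toNat 0 pvPlayers pvLevels pvActions

-- ===== PRECONDITION & SPEC =====
def Spec_game_event_generator (n : Int) (out : List (Int × String × Int × String)) : Prop := out = game_event_generator_alt n
instance (n : Int) (out : List (Int × String × Int × String)) : Decidable (Spec_game_event_generator n out) := by unfold Spec_game_event_generator; infer_instance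

-- ===== CLAIM (what is proved, stated in full; the proofs are below) =====
def Claim_equal_game_event_generator : Prop := ∀ (n : Int), Dom_game_event_generator n → Spec_game_event_generator n (game_event_generator n)

-- ===== LEMMAS AND PROOFS =====

-- the tuple A yields at index i
def pvF (i : Int) : Int × String × Int × String :=
  (i,
   PySem.List.pyGetD pvPlayers (PySem.Int.mod i 3) "",
   PySem.List.pyGetD pvLevels (PySem.Int.mod i 4) 0,
   PySem.List.pyGetD pvActions (PySem.Int.mod i 4) "")

-- the common normal form: k tuples starting at index i
def pvSeq : Nat → Int → List (Int × String × Int × String)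
  | 0, _ => []
  | k + 1, i => pvF i :: pvSeq k (i + 1)

theorem pvA_eq_seq : ∀ (k : Nat) (a : Int),
    (PySem.List.pyRange a (a + k) 1).map pvF = pvSeq k a := by
  intro k
  induction k with
  | zero => intro a; simp [PySem.List.pyRange_one_eq_nil, pvSeq]
  | succ k ih =>
    intro a
    rw [PySem.List.pyRange_one_cons (by omega : a < a + (k + 1 : Nat))]
    simp only [List.map_cons, pvSeq]
    rw [show (a + ((k : Nat) + 1 : Nat) : Int) = (a + 1) + (k : Nat) by push_cast; ring]
    rw [ih (a + 1)]

-- one cyclic step: head and advance of a rotating suffix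
theorem pv_headD_drop {α : Type} (xs : List α) (r : Nat) (d : α) :
    (xs.drop r).headD d = xs.getD r d := by
  simp [List.head?_drop, List.getD_eq_getElem?_getD]

theorem pv_cyc_step {α : Type} (xs : List α) (r : Nat) (hr : r < xs.length) :
    (if (xs.drop r).tail.isEmpty then xs else (xs.drop r).tail) = xs.drop ((r + 1) % xs.length) := by
  have htail : (xs.drop r).tail = xs.drop (r + 1) := by
    rw [List.tail_drop]
  by_cases h : r + 1 = xs.length
  · have hnil : xs.drop (r + 1) = [] := by
      apply List.drop_eq_nil_of_le; omega
    have hmod : (r + 1) % xs.length = 0 := by rw [← h, Nat.mod_self]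
    simp [htail, hnil, hmod]
  · have hlt : r + 1 < xs.length := by omega
    have hne : xs.drop (r + 1) ≠ [] := by
      rw [Ne, List.drop_eq_nil_iff]; omega
    have hmod : (r + 1) % xs.length = r + 1 := Nat.mod_eq_of_lt hlt
    simp [htail, hmod, List.isEmpty_iff, hne]

theorem pvB_eq_seq : ∀ (k j : Nat),
    pvAltLoop k j (pvPlayers.drop (j % 3)) (pvLevels.drop (j % 4)) (pvActions.drop (j % 4))
      = pvSeq k (j : Int) := by
  intro k
  induction k with
  | zero => intro j; rfl
  | succ k ih =>
    intro j
    have h3 : j % 3 < 3 := Nat.mod_lt _ (by norm_num)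
    have h4 : j % 4 < 4 := Nat.mod_lt _ (by norm_num)
    have hm3 : PySem.Int.mod (j : Int) 3 = ((j % 3 : Nat) : Int) := by
      exact_mod_cast PySem.Int.mod_natCast j 3
    have hm4 : PySem.Int.mod (j : Int) 4 = ((j % 4 : Nat) : Int) := by
      exact_mod_cast PySem.Int.mod_natCast j 4
    have e1 := pv_cyc_step pvPlayers (j % 3) (by simp [pvPlayers]; omega)
    have e2 := pv_cyc_step pvLevels (j % 4) (by simp [pvLevels]; omega)
    have e3 := pv_cyc_step pvActions (j % 4) (by simp [pvActions]; omega)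
    have l1 : pvPlayers.length = 3 := by rfl
    have l2 : pvLevels.length = 4 := by rfl
    have l3 : pvActions.length = 4 := by rfl
    rw [l1] at e1; rw [l2] at e2; rw [l3] at e3
    have m1 : (j % 3 + 1) % 3 = (j + 1) % 3 := by omega
    have m2 : (j % 4 + 1) % 4 = (j + 1) % 4 := by omega
    rw [m1] at e1; rw [m2] at e2; rw [m2] at e3
    have hIH := ih (j + 1)
    simp only [pvAltLoop, pvSeq, pvF, hm3, hm4, PySem.List.pyGetD_natCast,
      pv_headD_drop, e1, e2, e3]
    rw [show ((j : Int) + 1) = ((j + 1 : Nat) : Int) by omega, hIH]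

-- ===== VERDICT (by name: the statement is the Claim_ definition above) =====
theorem game_event_generator_spec : Claim_equal_game_event_generator := by
  intro n _
  unfold Spec_game_event_generator game_event_generator game_event_generator_alt
  have hB := pvB_eq_seq n.toNat 0
  simp only [Nat.zero_mod, List.drop_zero, Int.natCast_zero] at hB
  rw [hB]
  by_cases h : n ≤ 0
  · rw [PySem.List.pyRange_one_eq_nil h]
    have : n.toNat = 0 := by omega
    simp [this, pvSeq]
  · have hn : (0 : Int) + ((n.toNat : Nat) : Int) = n := by omega
    have hA := pvA_eq_seq n.toNat 0
    rw [hn] at hA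
    rw [← hA]
    rfl
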